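-- pv_equiv track=rewrite | github.com/Nandakishor2/Leetcode | 1430. Find the K-Beauty of a Number/Solution.py | divisorSubstrings
-- ===== SOURCE A (Python) =====
-- def divisorSubstrings(num, k):
--     temp = str(num)
--     count = 0
--     for i in range(len(temp)-k+1):
--         number = int(temp[i:i+k])
--         if number != 0 and num % number == 0:
--             count+=1
--
--     return count
-- ===== SOURCE B (Python) =====
-- def divisorSubstrings(num, k):
--     # Arithmetic sliding window: walk the decimal suffixes of num instead of
--     # slicing str(num); each k-digit window is t % 10**k for a suffix t >= 10**(k-1).
--     if k > len(str(num)):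
--         return 0
--     lo = 10 ** (k - 1)
--     hi = lo * 10
--     count = 0
--     t = num
--     while t >= lo:
--         w = t % hi
--         if w != 0 and num % w == 0:
--             count += 1
--         t //= 10
--     return count
-- ===== Notes on version B (the rewrite author's own statement) =====
-- stated objective: alternative
-- what changed: B replaces A's per-window string slice plus int() reparse by a purely arithmetic sliding window: it walks the decimal suffixes of num (t = num, num//10, ...), reading each k-digit window as t % 10**k while t >= 10**(k-1); str(num) is used only once, for the digit-count guard k > len(str(num)).
-- outside the precondition, e.g. on divisorSubstrings(-125, 2): A returns 2, B returns 0
import Mathlib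
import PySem

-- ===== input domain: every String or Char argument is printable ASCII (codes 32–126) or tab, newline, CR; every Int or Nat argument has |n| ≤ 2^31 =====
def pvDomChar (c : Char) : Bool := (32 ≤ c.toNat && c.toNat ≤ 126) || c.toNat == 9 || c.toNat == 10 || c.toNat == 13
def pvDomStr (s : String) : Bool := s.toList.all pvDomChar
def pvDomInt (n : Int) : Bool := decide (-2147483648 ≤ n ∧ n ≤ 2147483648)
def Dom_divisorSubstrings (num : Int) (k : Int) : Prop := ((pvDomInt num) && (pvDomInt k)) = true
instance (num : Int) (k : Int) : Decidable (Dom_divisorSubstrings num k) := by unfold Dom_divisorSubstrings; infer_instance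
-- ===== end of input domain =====

-- B replaces A's per-window string slicing + int() reparsing by a purely arithmetic walk
-- over the decimal suffixes of num (window = t % 10^k); an alternative algorithm, not claimed faster.


-- ===== PORT A =====
-- literal port of A: temp = str(num); for i in range(len(temp)-k+1): number = int(temp[i:i+k]); ...
-- int() on a slice that is '' or '-' raises ValueError in Python (ofChars? = none); those inputs are outside Pre_.
def divisorSubstrings (num : Int) (k : Int) : Int :=
  let temp := PySem.Int.toChars num
  (PySem.List.pyRange 0 (PySem.List.len temp - k + 1) 1).foldl
    (fun count i =>
      match PySem.Int.ofChars? (PySem.List.slice temp (some i) (some (i + k))) with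
      | some number => if number ≠ 0 ∧ PySem.Int.mod num number = 0 then count + 1 else count
      | none => count)
    0

-- ===== PORT B =====
-- the while loop of Source B; the extra `1 ≤ lo` conjunct is a totality guard only
-- (under Pre_, lo = 10^(k-1) ≥ 1 always holds, so the guard is exactly Python's `t >= lo`)
def bGo (num lo hi t count : Int) : Int :=
  if h : 1 ≤ lo ∧ lo ≤ t then
    let w := PySem.Int.mod t hi
    bGo num lo hi (PySem.Int.floordiv t 10)
      (if w ≠ 0 ∧ PySem.Int.mod num w = 0 then count + 1 else count)
  else count
termination_by t.toNat
decreasing_by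
  rw [PySem.Int.floordiv_eq_ediv_of_pos (by norm_num)]
  omega

def divisorSubstrings_alt (num : Int) (k : Int) : Int :=
  if PySem.List.len (PySem.Int.toChars num) < k then 0
  else
    let lo : Int := 10 ^ (k - 1).toNat   -- Python's 10 ** (k - 1); k ≥ 1 under Pre_
    let hi : Int := lo * 10
    bGo num lo hi num 0

-- ===== PRECONDITION & SPEC =====
-- Pre_ restricts to the task's natural domain (nonnegative num, k ≥ 1): A raises ValueError when
-- k ≤ 0 (an empty slice reaches int()) and when num < 0 ∧ k = 1 (the slice '-'), and for
-- num < 0 ∧ k ≥ 2 A's first window is a '-'-prefixed slice parsed as a negative number — an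
-- artefact of slicing the sign character which the arithmetic reimplementation does not reproduce.
def Pre_divisorSubstrings (num : Int) (k : Int) : Prop := 0 ≤ num ∧ 1 ≤ k
instance (num : Int) (k : Int) : Decidable (Pre_divisorSubstrings num k) := by
  unfold Pre_divisorSubstrings; infer_instance

def pvWitness_divisorSubstrings : Int × Int := (240, 2)

def Spec_divisorSubstrings (num : Int) (k : Int) (out : Int) : Prop := out = divisorSubstrings_alt num k
instance (num : Int) (k : Int) (out : Int) : Decidable (Spec_divisorSubstrings num k out) := by unfold Spec_divisorSubstrings; infer_instance

-- ===== CLAIM (what is proved, stated in full; the proofs are below) =====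
def Claim_equal_divisorSubstrings : Prop := ∀ (num : Int) (k : Int), Dom_divisorSubstrings num k → Pre_divisorSubstrings num k → Spec_divisorSubstrings num k (divisorSubstrings num k)

-- ===== LEMMAS AND PROOFS =====

-- digit values of t, most significant first (nd 0 = [0], like str)
def nd (t : Nat) : List Nat :=
  if t < 10 then [t] else nd (t / 10) ++ [t % 10]
termination_by t
decreasing_by exact Nat.div_lt_self (by omega) (by norm_num)

-- value of a digit list (most significant first)
def valOf (l : List Nat) : Nat := l.foldl (fun a d => a * 10 + d) 0

-- 0/1 indicator of A's window test, on the Nat value of a window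
def wind (num : Int) (w : Nat) : Int :=
  if ((w : Int) ≠ 0 ∧ PySem.Int.mod num (w : Int) = 0) then 1 else 0

-- the common count: windows of width kk over a digit list
def cnt (num : Int) (kk : Nat) (l : List Nat) : Int :=
  ((List.range (l.length + 1 - kk)).map (fun i => wind num (valOf ((l.drop i).take kk)))).sum

theorem nd_small (t : Nat) (h : t < 10) : nd t = [t] := by rw [nd]; simp [h]
theorem nd_big (t : Nat) (h : 10 ≤ t) : nd t = nd (t / 10) ++ [t % 10] := by
  rw [nd]; simp [Nat.not_lt.mpr h]

theorem nd_digits (t : Nat) : ∀ d ∈ nd t, d < 10 := by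
  induction t using nd.induct with
  | case1 t h => rw [nd_small t h]; simpa using h
  | case2 t h ih =>
    rw [nd_big t (by omega)]
    intro d hd
    rcases List.mem_append.mp hd with h1 | h1
    · exact ih d h1
    · simp at h1; omega

theorem nd_ne_nil (t : Nat) : nd t ≠ [] := by
  by_cases h : t < 10
  · rw [nd_small t h]; simp
  · rw [nd_big t (by omega)]; simp

theorem val_append (l : List Nat) (d : Nat) : valOf (l ++ [d]) = valOf l * 10 + d := by
  simp [valOf]

theorem val_nd (t : Nat) : valOf (nd t) = t := by
  induction t using nd.induct with
  | case1 t h => simp [nd_small t h, valOf]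
  | case2 t h ih =>
    rw [nd_big t (by omega), val_append, ih]
    omega

theorem len_nd_div (t : Nat) (h : 10 ≤ t) : (nd t).length = (nd (t / 10)).length + 1 := by
  rw [nd_big t h]; simp

theorem lt_pow_len (t : Nat) : t < 10 ^ (nd t).length := by
  induction t using nd.induct with
  | case1 t h => rw [nd_small t h]; simpa using h
  | case2 t h ih =>
    rw [len_nd_div t (by omega), pow_succ]
    have h2 : t % 10 < 10 := Nat.mod_lt _ (by norm_num)
    have h3 : t = 10 * (t / 10) + t % 10 := (Nat.div_add_mod t 10).symm
    nlinarith [ih]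

theorem pow_len_le (t : Nat) (h : 1 ≤ t) : 10 ^ ((nd t).length - 1) ≤ t := by
  induction t using nd.induct with
  | case1 t ht => rw [nd_small t ht]; simpa
  | case2 t ht ih =>
    have h10 : 10 ≤ t := by omega
    have hq : 1 ≤ t / 10 := Nat.one_le_div_iff (by norm_num) |>.mpr h10
    have hlen : 1 ≤ (nd (t / 10)).length := by
      have := nd_ne_nil (t / 10); cases hnd : nd (t / 10) with
      | nil => exact absurd hnd this
      | cons a l => simp
    rw [len_nd_div t h10]
    have : 10 ^ ((nd (t / 10)).length - 1) ≤ t / 10 := ih hq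
    have h4 : 10 ^ ((nd (t / 10)).length - 1) * 10 ≤ t / 10 * 10 := by omega
    have h5 : t / 10 * 10 ≤ t := Nat.div_mul_le_self t 10
    calc 10 ^ ((nd (t/10)).length + 1 - 1) = 10 ^ ((nd (t/10)).length - 1) * 10 := by
          rw [Nat.add_sub_cancel, ← pow_succ]
          congr 1
          omega
      _ ≤ t := le_trans h4 h5

-- value of the k-digit suffix
theorem mod_step (u r kk : Nat) (hr : r < 10) (hk : 1 ≤ kk) :
    (10 * u + r) % 10 ^ kk = u % 10 ^ (kk - 1) * 10 + r := by
  set p := 10 ^ (kk - 1) with hp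
  have hpk : 10 ^ kk = p * 10 := by
    rw [hp, ← pow_succ]
    congr 1
    omega
  have hp1 : 0 < p := pow_pos (by norm_num) _
  have hB : u % p < p := Nat.mod_lt _ hp1
  have h := Nat.div_add_mod u p
  have e2 : u / p * (p * 10) = 10 * (p * (u / p)) := by ring
  have e : 10 * u + r = (u % p * 10 + r) + u / p * (p * 10) := by omega
  rw [hpk, e, Nat.add_mul_mod_self_right]
  exact Nat.mod_eq_of_lt (by omega)

theorem val_suffix' (t : Nat) : ∀ (kk : Nat), 1 ≤ kk → kk ≤ (nd t).length →
    valOf ((nd t).drop ((nd t).length - kk)) = t % 10 ^ kk := by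
  induction t using nd.induct with
  | case1 t h =>
    intro kk h1 h2
    rw [nd_small t h] at h2 ⊢
    simp at h2
    have hkk : kk = 1 := by omega
    subst hkk
    simp [valOf, Nat.mod_eq_of_lt h]
  | case2 t h ih =>
    intro kk h1 h2
    have h10 : 10 ≤ t := by omega
    have hlen := len_nd_div t h10
    by_cases hcase : kk = (nd t).length
    · subst hcase
      simp only [Nat.sub_self, List.drop_zero, val_nd]
      exact (Nat.mod_eq_of_lt (lt_pow_len t)).symm
    · have hkk : kk ≤ (nd (t / 10)).length := by omega
      rw [nd_big t h10]
      have hL : (nd (t / 10) ++ [t % 10]).length = (nd (t / 10)).length + 1 := by simp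
      rw [hL, List.drop_append_of_le_length (by omega), val_append,
        show (nd (t / 10)).length + 1 - kk = (nd (t / 10)).length - (kk - 1) by omega]
      have hval : valOf ((nd (t / 10)).drop ((nd (t / 10)).length - (kk - 1)))
          = t / 10 % 10 ^ (kk - 1) := by
        by_cases hk1 : kk = 1
        · subst hk1
          simp [valOf, Nat.mod_one]
        · exact ih (kk - 1) (by omega) (by omega)
      rw [hval]
      have ht : t = 10 * (t / 10) + t % 10 := by omega
      conv_rhs => rw [ht]
      exact (mod_step (t / 10) (t % 10) kk (Nat.mod_lt _ (by norm_num)) h1).symm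

theorem val_suffix (t : Nat) (kk : Nat) (h1 : 1 ≤ kk) (h2 : kk ≤ (nd t).length) :
    valOf (((nd t).drop ((nd t).length - kk)).take kk) = t % 10 ^ kk := by
  rw [List.take_of_length_le (by rw [List.length_drop]; omega)]
  exact val_suffix' t kk h1 h2

-- int() of a pure digit string
theorem digitChar_not_space (d : Nat) (h : d < 10) : PySem.Int.isIntSpace (Nat.digitChar d) = false := by
  interval_cases d <;> decide
theorem digitChar_ne_dash (d : Nat) (h : d < 10) : Nat.digitChar d ≠ '-' := by
  interval_cases d <;> decide
theorem digitChar_ne_plus (d : Nat) (h : d < 10) : Nat.digitChar d ≠ '+' := by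
  interval_cases d <;> decide
theorem digitChar_isDigit (d : Nat) (h : d < 10) : (Nat.digitChar d).isDigit = true := by
  interval_cases d <;> decide
theorem digitChar_val (d : Nat) (h : d < 10) : (Nat.digitChar d).toNat - '0'.toNat = d := by
  interval_cases d <;> decide

theorem dropWhile_space_digits (l : List Nat) (h : ∀ d ∈ l, d < 10) :
    (l.map Nat.digitChar).dropWhile PySem.Int.isIntSpace = l.map Nat.digitChar := by
  cases l with
  | nil => rfl
  | cons d ls =>
    simp only [List.map_cons, List.dropWhile_cons, digitChar_not_space d (h d (by simp))]
    simp

theorem optStep (v : Nat) (q : Option Nat) (hq : q = some v) :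
    Option.map (fun n => n) (do let a ← q; pure ((a : Nat) : Int)) = some ((v : Nat) : Int) := by
  subst hq; rfl

theorem parse_digits (l : List Nat) (h : ∀ d ∈ l, d < 10) (hne : l ≠ []) :
    PySem.Int.ofChars? (l.map Nat.digitChar) = some ((valOf l : Nat) : Int) := by
  obtain ⟨d, ls, rfl⟩ : ∃ d ls, l = d :: ls := by
    cases l with
    | nil => exact absurd rfl hne
    | cons d ls => exact ⟨d, ls, rfl⟩
  unfold PySem.Int.ofChars?
  rw [dropWhile_space_digits _ h, ← List.map_reverse,
    dropWhile_space_digits _ (fun x hx => h x (List.mem_reverse.mp hx)),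
    List.map_reverse, List.reverse_reverse]
  dsimp only [List.map_cons]
  split
  · next heq => injection heq with h1 _; exact absurd h1 (digitChar_ne_dash d (h d (by simp)))
  · next heq => injection heq with h1 _; exact absurd h1 (digitChar_ne_plus d (h d (by simp)))
  · next hx1 hx2 =>
    clear hx1 hx2
    apply optStep
    conv_lhs => whnf
    rw [digitChar_isDigit d (h d (by simp))]
    conv_lhs => whnf
    rw [digitChar_val d (h d (by simp))]
    simp only [valOf, List.foldl_cons]
    have h' : ∀ x ∈ ls, x < 10 := fun x hx => h x (by simp [hx])
    generalize 0 * 10 + d = a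
    clear hne h
    induction ls generalizing a with
    | nil => rfl
    | cons e ls ih =>
      have he : e < 10 := h' e (by simp)
      conv_lhs => whnf
      rw [digitChar_isDigit e he]
      conv_lhs => whnf
      rw [digitChar_val e he]
      simp only [List.foldl_cons]
      exact ih (fun x hx => h' x (by simp [hx])) (a * 10 + e)

-- str(num) for num ≥ 0 is the digit list of nd
theorem toDigitsCore_eq (f : Nat) : ∀ (t : Nat) (acc : List Char), t < f →
    Nat.toDigitsCore 10 f t acc = (nd t).map Nat.digitChar ++ acc := by
  induction f with
  | zero => intro t acc h; omega
  | succ f ih =>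
    intro t acc h
    rw [Nat.toDigitsCore]
    by_cases h10 : t < 10
    · have hz : t / 10 = 0 := Nat.div_eq_of_lt h10
      simp only [hz]
      rw [nd_small t h10, Nat.mod_eq_of_lt h10]
      simp
    · have hz : ¬ t / 10 = 0 := by
        have : 1 ≤ t / 10 := Nat.one_le_div_iff (by norm_num) |>.mpr (by omega)
        omega
      simp only [hz]
      rw [ih (t / 10) _ (by omega)]
      rw [nd_big t (by omega)]
      simp

theorem toChars_eq (num : Int) (h : 0 ≤ num) :
    PySem.Int.toChars num = (nd num.toNat).map Nat.digitChar := by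
  unfold PySem.Int.toChars
  rw [if_neg (by omega)]
  rw [Nat.toDigits]
  rw [toDigitsCore_eq (num.toNat + 1) num.toNat [] (by omega)]
  simp

theorem cnt_gt_len (num : Int) (kk : Nat) (l : List Nat) (h : l.length < kk) :
    cnt num kk l = 0 := by
  have : l.length + 1 - kk = 0 := by omega
  simp [cnt, this]

theorem if_count (P : Prop) [Decidable P] (c : Int) :
    (if P then c + 1 else c) = c + (if P then 1 else 0) := by split <;> ring

-- A's foldl computes cnt
theorem A_eq_cnt (num k : Int) (h0 : 0 ≤ num) (hk : 1 ≤ k) :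
    divisorSubstrings num k = cnt num k.toNat (nd num.toNat) := by
  unfold divisorSubstrings
  rw [toChars_eq num h0]
  set L := nd num.toNat with hL
  set kk := k.toNat with hkk
  have hkcast : k = (kk : Int) := by omega
  simp only [PySem.List.len_eq, List.length_map]
  rw [PySem.List.pyRange_one, List.foldl_map]
  have hr : ((L.length : Int) - k + 1 - 0).toNat = L.length + 1 - kk := by omega
  rw [hr]
  rw [PySem.List.foldl_congr_mem (List.range (L.length + 1 - kk)) _
    (fun c j => c + wind num (valOf ((L.drop j).take kk))) 0 ?_]
  · rw [PySem.List.foldl_add]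
    rw [zero_add]
    rfl
  · intro c j hj
    have hj' : j < L.length + 1 - kk := List.mem_range.mp hj
    have hjk : j + kk ≤ L.length := by omega
    have hcast : (0 : Int) + (j : Int) + k = ((j + kk : Nat) : Int) := by omega
    rw [hcast, zero_add, PySem.List.slice_natCast]
    have hsub : j + kk - j = kk := by omega
    rw [hsub, ← List.map_drop, ← List.map_take]
    set W := (L.drop j).take kk with hW
    have hWlen : W.length = kk := by
      rw [hW, List.length_take, List.length_drop]
      omega
    have hWdig : ∀ d ∈ W, d < 10 := fun d hd =>
      nd_digits num.toNat d (List.mem_of_mem_drop (List.mem_of_mem_take hd))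
    have hWne : W ≠ [] := by
      intro hcon
      rw [hcon] at hWlen
      simp at hWlen
      omega
    rw [parse_digits W hWdig hWne]
    dsimp only
    rw [if_count]
    rfl

-- the window recurrence for cnt
theorem cnt_append (num : Int) (kk : Nat) (l : List Nat) (d : Nat) (h1 : 1 ≤ kk)
    (h2 : kk ≤ l.length + 1) :
    cnt num kk (l ++ [d]) =
      cnt num kk l + wind num (valOf (((l ++ [d]).drop (l.length + 1 - kk)).take kk)) := by
  unfold cnt
  have hL : (l ++ [d]).length + 1 - kk = (l.length + 1 - kk) + 1 := by
    simp only [List.length_append, List.length_cons, List.length_nil]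
    omega
  rw [hL, List.range_succ, List.map_append, List.sum_append]
  congr 1
  · congr 1
    apply List.map_congr_left
    intro i hi
    have hi' : i < l.length + 1 - kk := List.mem_range.mp hi
    congr 2
    rw [List.drop_append_of_le_length (by omega),
      List.take_append_of_le_length (by rw [List.length_drop]; omega)]
  · simp

theorem wind_zero (num : Int) : wind num 0 = 0 := by simp [wind]

theorem cnt_nd_step (num : Int) (kk : Nat) (t : Nat) (h1 : 1 ≤ kk)
    (h2 : kk ≤ (nd t).length) :
    cnt num kk (nd t) = cnt num kk (nd (t / 10)) + wind num (t % 10 ^ kk) := by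
  by_cases h10 : t < 10
  · have hlen : (nd t).length = 1 := by rw [nd_small t h10]; rfl
    have hkk : kk = 1 := by omega
    subst hkk
    have hz : t / 10 = 0 := Nat.div_eq_of_lt h10
    rw [nd_small t h10, hz, nd_small 0 (by norm_num)]
    simp [cnt, valOf, wind_zero, Nat.mod_eq_of_lt h10]
  · have h10' : 10 ≤ t := by omega
    have hsuf := val_suffix t kk h1 h2
    rw [nd_big t h10'] at hsuf
    rw [show (nd (t / 10) ++ [t % 10]).length = (nd (t / 10)).length + 1 by simp] at hsuf
    rw [nd_big t h10',
      cnt_append num kk _ _ h1 (by rw [← len_nd_div t h10']; exact h2)]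
    rw [hsuf]

-- B's loop computes cnt
theorem cnt_small (num : Int) (kk : Nat) (T : Nat) (h1 : 1 ≤ kk) (hT : T < 10 ^ (kk - 1)) :
    cnt num kk (nd T) = 0 := by
  by_cases hT0 : T = 0
  · subst hT0
    rw [nd_small 0 (by norm_num)]
    by_cases hk1 : kk = 1
    · subst hk1
      simp [cnt, valOf, wind_zero]
    · have : (1 : Nat) + 1 - kk = 0 := by omega
      simp [cnt, this]
  · have hlo := pow_len_le T (by omega)
    have hlt : (nd T).length - 1 < kk - 1 := by
      by_contra hcon
      have hcon' : kk - 1 ≤ (nd T).length - 1 := by omega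
      have : 10 ^ (kk - 1) ≤ T := le_trans (Nat.pow_le_pow_right (by norm_num) hcon') hlo
      omega
    have hlen1 : 1 ≤ (nd T).length := by
      have := nd_ne_nil T
      cases hnd : nd T with
      | nil => exact absurd hnd this
      | cons a l => simp
    have : (nd T).length + 1 - kk = 0 := by omega
    simp [cnt, this]

theorem bGo_eq_cnt (num : Int) (kk : Nat) (h1 : 1 ≤ kk) :
    ∀ (T : Nat) (c : Int),
      bGo num ((10 ^ (kk - 1) : Nat) : Int) ((10 ^ kk : Nat) : Int) (T : Int) c
        = c + cnt num kk (nd T) := by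
  intro T
  induction T using Nat.strong_induction_on with
  | _ T ih =>
    intro c
    rw [bGo]
    have hlo1 : (1 : Int) ≤ ((10 ^ (kk - 1) : Nat) : Int) := by
      have : 1 ≤ 10 ^ (kk - 1) := Nat.one_le_pow _ _ (by norm_num)
      exact_mod_cast this
    by_cases hcond : ((10 ^ (kk - 1) : Nat) : Int) ≤ (T : Int)
    · rw [dif_pos ⟨hlo1, hcond⟩]
      have hT1 : 10 ^ (kk - 1) ≤ T := by exact_mod_cast hcond
      have hTpos : 1 ≤ T := le_trans (Nat.one_le_pow _ _ (by norm_num)) hT1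
      have hdiv : PySem.Int.floordiv (T : Int) 10 = ((T / 10 : Nat) : Int) := by
        rw [PySem.Int.floordiv_eq_ediv_of_pos (by norm_num)]
        omega
      have hmod : PySem.Int.mod (T : Int) ((10 ^ kk : Nat) : Int) = ((T % 10 ^ kk : Nat) : Int) :=
        PySem.Int.mod_natCast T (10 ^ kk)
      simp only [hdiv, hmod, if_count]
      rw [ih (T / 10) (Nat.div_lt_self (by omega) (by norm_num))]
      have hkklen : kk ≤ (nd T).length := by
        have hlt := lt_pow_len T
        have : 10 ^ (kk - 1) < 10 ^ (nd T).length := lt_of_le_of_lt hT1 hlt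
        have := (Nat.pow_lt_pow_iff_right (by norm_num : 1 < 10)).mp this
        omega
      rw [cnt_nd_step num kk T h1 hkklen]
      have : (if ((T % 10 ^ kk : Nat) : Int) ≠ 0 ∧ PySem.Int.mod num ((T % 10 ^ kk : Nat) : Int) = 0 then (1 : Int) else 0) = wind num (T % 10 ^ kk) := rfl
      rw [this]
      ring
    · rw [dif_neg (by tauto)]
      have hT : T < 10 ^ (kk - 1) := by exact_mod_cast not_le.mp hcond
      rw [cnt_small num kk T h1 hT]
      ring

-- ===== VERDICT (by name: the statement is the Claim_ definition above) =====
theorem divisorSubstrings_spec : Claim_equal_divisorSubstrings := by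
  intro num k _hdom hpre
  obtain ⟨h0, hk⟩ := hpre
  unfold Spec_divisorSubstrings divisorSubstrings_alt
  rw [A_eq_cnt num k h0 hk]
  set kk := k.toNat with hkk
  have hk1 : 1 ≤ kk := by omega
  have hlen : PySem.List.len (PySem.Int.toChars num) = ((nd num.toNat).length : Int) := by
    rw [toChars_eq num h0]
    simp [PySem.List.len_eq]
  by_cases hbig : PySem.List.len (PySem.Int.toChars num) < k
  · rw [if_pos hbig]
    rw [hlen] at hbig
    exact cnt_gt_len num kk _ (by omega)
  rw [if_neg hbig]
  have e1 : (10 : Int) ^ (k - 1).toNat = ((10 ^ (kk - 1) : Nat) : Int) := by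
    rw [show (k - 1).toNat = kk - 1 by omega]
    push_cast
    ring
  have e2 : ((10 ^ (kk - 1) : Nat) : Int) * 10 = ((10 ^ kk : Nat) : Int) := by
    push_cast
    rw [← pow_succ]
    congr 1
    omega
  have e3 : num = ((num.toNat : Nat) : Int) := by omega
  simp only [e1, e2]
  have hbgo := bGo_eq_cnt num kk hk1 num.toNat 0
  rw [← e3, zero_add] at hbgo
  exact hbgo.symm
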